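-- pv_equiv track=rewrite | github.com/Pdrowsky/TCC-qualidade-ar | 1_extracao_padronizacao.py | clean_numeric
-- ===== SOURCE A (Python) =====
-- def clean_numeric(value):
--     if isinstance(value, str):
--         # Remover caracteres não numéricos exceto ponto, vírgula e sinal negativo
--         cleaned = ''.join(c for c in value if c in '0123456789.,-')
--         # Substituir vírgula por ponto
--         cleaned = cleaned.replace(',', '.')
--         # Remover múltiplos pontos (caso haja)
--         if cleaned.count('.') > 1:
--             parts = cleaned.split('.')
--             cleaned = parts[0] + '.' + ''.join(parts[1:])
--         return cleaned
--     return value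
-- ===== SOURCE B (Python) =====
-- def clean_numeric(value):
--     if not isinstance(value, str):
--         return value
--     out = []
--     dot_used = False
--     for c in value:
--         if c not in '0123456789.,-':
--             continue
--         if c in '.,':
--             if not dot_used:
--                 out.append('.')
--                 dot_used = True
--         else:
--             out.append(c)
--     return ''.join(out)
-- ===== Notes on version B (the rewrite author's own statement) =====
-- stated objective: simpler
-- what changed: B replaces A's four-phase pipeline (filter-join, global comma-to-dot replace, count dots, split-and-rejoin to collapse extra dots) by a single left-to-right pass with a dot_used flag that emits digits and '-' unchanged, emits '.' for the first dot-or-comma and drops later ones.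
import Mathlib
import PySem

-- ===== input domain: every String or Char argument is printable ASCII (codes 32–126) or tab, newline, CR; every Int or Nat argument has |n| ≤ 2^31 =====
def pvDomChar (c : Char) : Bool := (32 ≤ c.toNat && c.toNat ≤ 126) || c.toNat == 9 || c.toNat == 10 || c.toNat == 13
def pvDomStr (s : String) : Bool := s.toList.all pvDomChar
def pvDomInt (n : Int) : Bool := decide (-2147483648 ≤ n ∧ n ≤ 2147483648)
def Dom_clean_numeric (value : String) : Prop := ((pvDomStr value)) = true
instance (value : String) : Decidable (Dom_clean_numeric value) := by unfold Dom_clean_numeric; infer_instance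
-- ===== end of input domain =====

-- B replaces A's filter/replace/count/split-rejoin pipeline by one left-to-right pass with a dot_used flag; objective: simpler.


-- ===== PORT A =====
-- shared helper: the characters kept by the Python membership test `c in '0123456789.,-'`
def pvAllowed : List Char := "0123456789.,-".toList

def clean_numeric (value : String) : String :=
  -- cleaned = ''.join(c for c in value if c in '0123456789.,-')
  let cleaned := value.toList.filter (fun c => pvAllowed.contains c)
  -- cleaned = cleaned.replace(',', '.')
  let cleaned := PySem.Chars.replace cleaned [','] ['.']
  -- if cleaned.count('.') > 1:
  if 1 < PySem.Chars.count cleaned ['.'] then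
    -- parts = cleaned.split('.')
    let parts := PySem.Chars.splitOn cleaned ['.']
    -- cleaned = parts[0] + '.' + ''.join(parts[1:])   (split never returns []: parts[0] = headD [] is exact)
    String.mk (parts.headD [] ++ ['.'] ++ PySem.Chars.join [] (PySem.List.slice parts (some 1) none))
  else
    String.mk cleaned

-- ===== PORT B =====
def clean_numeric_alt (value : String) : String :=
  -- single pass: state = (dot_used, out); skip disallowed chars, first ','/'.' becomes '.', later ones dropped
  let st := value.toList.foldl
    (fun (st : Bool × List Char) c =>
      if !(pvAllowed.contains c) then st
      else if ['.', ','].contains c then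
        if st.1 then st else (true, st.2 ++ ['.'])
      else (st.1, st.2 ++ [c]))
    (false, [])
  String.mk st.2

-- ===== PRECONDITION & SPEC =====
def Spec_clean_numeric (value : String) (out : String) : Prop := out = clean_numeric_alt value
instance (value : String) (out : String) : Decidable (Spec_clean_numeric value out) := by unfold Spec_clean_numeric; infer_instance

-- ===== CLAIM (what is proved, stated in full; the proofs are below) =====
def Claim_equal_clean_numeric : Prop := ∀ (value : String), Dom_clean_numeric value → Spec_clean_numeric value (clean_numeric value)

-- ===== LEMMAS AND PROOFS =====

-- comma→dot map performed by A's replace(',', '.')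
def pvMap (c : Char) : Char := if c = ',' then '.' else c

-- the scan both programs compute on the filtered+mapped characters: keep only the first '.'
def pvScan : Bool → List Char → List Char
  | _, [] => []
  | b, c :: t => if c = '.' then (if b then pvScan b t else '.' :: pvScan true t) else c :: pvScan b t

lemma pv_replace_go (l acc : List Char) (fuel : Nat) (h : l.length ≤ fuel) :
    PySem.Chars.replace.go [','] ['.'] fuel l acc = acc.reverse ++ l.map pvMap := by
  induction l generalizing fuel acc with
  | nil => cases fuel <;> simp [PySem.Chars.replace.go]
  | cons c t ih =>
    cases fuel with
    | zero => simp at h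
    | succ f =>
      simp only [List.length_cons, Nat.succ_le_succ_iff] at h
      by_cases hc : c = ','
      · subst hc
        simp [PySem.Chars.replace.go, List.isPrefixOf, ih _ _ h, pvMap]
      · simp [PySem.Chars.replace.go, List.isPrefixOf, hc, ih _ _ h, pvMap,
          (by simpa using (Ne.symm hc) : (',' == c) = false)]

lemma pv_replace (l : List Char) :
    PySem.Chars.replace l [','] ['.'] = l.map pvMap := by
  simpa using pv_replace_go l [] l.length le_rfl

lemma pv_count_go (l : List Char) (acc fuel : Nat) (h : l.length ≤ fuel) :
    PySem.Chars.count.go ['.'] fuel l acc = acc + l.count '.' := by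
  induction l generalizing fuel acc with
  | nil => cases fuel <;> simp [PySem.Chars.count.go]
  | cons c t ih =>
    cases fuel with
    | zero => simp at h
    | succ f =>
      simp only [List.length_cons, Nat.succ_le_succ_iff] at h
      by_cases hc : c = '.'
      · subst hc
        simp [PySem.Chars.count.go, List.isPrefixOf, ih _ _ h]
        omega
      · simp [PySem.Chars.count.go, List.isPrefixOf, hc, ih _ _ h,
          (by simpa using (Ne.symm hc) : ('.' == c) = false)]

lemma pv_count (l : List Char) :
    PySem.Chars.count l ['.'] = l.count '.' := by
  simpa [PySem.Chars.count] using pv_count_go l 0 l.length le_rfl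

lemma pv_modifyHead_id (s : List (List Char)) : s.modifyHead (fun x => x) = s := by
  cases s <;> rfl

lemma pv_splitOn_go (l cur : List Char) (acc : List (List Char)) (fuel : Nat) (h : l.length ≤ fuel) :
    PySem.Chars.splitOn.go ['.'] fuel l cur acc
      = acc.reverse ++ (l.splitOnP (· == '.')).modifyHead (cur.reverse ++ ·) := by
  induction l generalizing fuel cur acc with
  | nil => cases fuel <;> simp [PySem.Chars.splitOn.go, List.splitOnP_nil]
  | cons c t ih =>
    cases fuel with
    | zero => simp at h
    | succ f =>
      simp only [List.length_cons, Nat.succ_le_succ_iff] at h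
      by_cases hc : c = '.'
      · subst hc
        simp [PySem.Chars.splitOn.go, List.isPrefixOf, ih _ _ _ h, List.splitOnP_cons,
          pv_modifyHead_id]
      · have hne : ∀ (s : List (List Char)), s ≠ [] →
            (s.modifyHead (List.cons c)).modifyHead (cur.reverse ++ ·)
              = s.modifyHead ((cur.reverse ++ [c]) ++ ·) := by
          intro s hs
          cases s with
          | nil => exact absurd rfl hs
          | cons a as => simp
        simp [PySem.Chars.splitOn.go, List.isPrefixOf, hc, List.splitOnP_cons,
          (by simpa using (Ne.symm hc) : ('.' == c) = false),
          ih _ _ _ h, hne _ (List.splitOnP_ne_nil _ t)]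

lemma pv_splitOn (l : List Char) :
    PySem.Chars.splitOn l ['.'] = l.splitOnP (· == '.') := by
  have := pv_splitOn_go l [] [] (l.length + 1) (by omega)
  simpa [PySem.Chars.splitOn, pv_modifyHead_id] using this

lemma pv_join_nil (xs : List (List Char)) :
    PySem.Chars.join [] xs = xs.flatten := by
  induction xs with
  | nil => simp [PySem.Chars.join, List.intercalate]
  | cons a as ih =>
    cases as with
    | nil => simp [PySem.Chars.join, List.intercalate]
    | cons b bs =>
      simp only [PySem.Chars.join, List.intercalate, List.intersperse] at ih ⊢
      simp [ih, List.flatten]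

lemma pv_scan_true (l : List Char) :
    pvScan true l = l.filter (fun c => !(c == '.')) := by
  induction l with
  | nil => simp [pvScan]
  | cons c t ih =>
    by_cases hc : c = '.'
    · subst hc; simp [pvScan, ih]
    · simp [pvScan, hc, ih]

lemma pv_flatten_splitOnP (l : List Char) :
    (l.splitOnP (· == '.')).flatten = l.filter (fun c => !(c == '.')) := by
  induction l with
  | nil => simp [List.splitOnP_nil]
  | cons c t ih =>
    by_cases hc : c = '.'
    · subst hc; simp [List.splitOnP_cons, ih]
    · have hs := List.splitOnP_ne_nil (p := (· == '.')) t
      cases h : t.splitOnP (· == '.') with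
      | nil => exact absurd h hs
      | cons a as =>
        simp [List.splitOnP_cons, hc, h] at ih ⊢
        simp [ih]

-- the scan computes exactly A's split-and-rejoin result
lemma pv_scan_false (l : List Char) :
    pvScan false l =
      if 1 < l.count '.' then
        (l.splitOnP (· == '.')).headD [] ++ ['.'] ++ ((l.splitOnP (· == '.')).drop 1).flatten
      else l := by
  induction l with
  | nil => simp [pvScan]
  | cons c t ih =>
    by_cases hc : c = '.'
    · subst hc
      by_cases ht : 1 ≤ t.count '.'
      · have h1 : 1 < ('.' :: t).count '.' := by rw [List.count_cons_self]; omega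
        have h0 : pvScan false ('.' :: t) = '.' :: pvScan true t := by simp [pvScan]
        rw [h0, if_pos h1]
        simp [List.splitOnP_cons, pv_scan_true, pv_flatten_splitOnP]
      · have h0 : t.count '.' = 0 := by omega
        have h1 : ¬ 1 < ('.' :: t).count '.' := by rw [List.count_cons_self]; omega
        rw [if_neg h1]
        have : pvScan true t = t := by
          rw [pv_scan_true, List.filter_eq_self]
          intro a ha
          simp only [Bool.not_eq_eq_eq_not, Bool.not_true, beq_eq_false_iff_ne]
          intro h; subst h
          exact absurd (List.count_eq_zero.mp h0 ha) (fun _ => by simp_all)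
        simp [pvScan, this]
    · have hcount : (c :: t).count '.' = t.count '.' := by
        simp [hc]
      have hs := List.splitOnP_ne_nil (p := (· == '.')) t
      cases h : t.splitOnP (· == '.') with
      | nil => exact absurd h hs
      | cons a as =>
        by_cases h1 : 1 < t.count '.'
        · rw [if_pos (by omega : 1 < (c :: t).count '.')]
          simp [List.splitOnP_cons, hc, h]
          rw [show pvScan false (c :: t) = c :: pvScan false t by simp [pvScan, hc]]
          rw [ih, if_pos h1, h]
          simp
        · rw [if_neg (by omega : ¬ 1 < (c :: t).count '.')]
          rw [show pvScan false (c :: t) = c :: pvScan false t by simp [pvScan, hc]]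
          rw [ih, if_neg h1]

-- B's fold, characterised: flag = a kept dot was seen; output = pvScan of the filtered+mapped chars
lemma pv_foldB (l : List Char) (b : Bool) (acc : List Char) :
    l.foldl
      (fun (st : Bool × List Char) c =>
        if !(pvAllowed.contains c) then st
        else if ['.', ','].contains c then
          if st.1 then st else (true, st.2 ++ ['.'])
        else (st.1, st.2 ++ [c]))
      (b, acc)
    = (b || ((l.filter (fun c => pvAllowed.contains c)).map pvMap).contains '.',
       acc ++ pvScan b ((l.filter (fun c => pvAllowed.contains c)).map pvMap)) := by
  induction l generalizing b acc with
  | nil => simp [pvScan]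
  | cons c t ih =>
    by_cases hp : pvAllowed.contains c
    · have hp' : c ∈ pvAllowed := by simpa using hp
      by_cases hd : c = '.' ∨ c = ','
      · have hm : pvMap c = '.' := by
          rcases hd with h | h <;> subst h <;> simp [pvMap]
        have hdc : (['.', ','].contains c) = true := by
          rcases hd with h | h <;> subst h <;> simp
        cases b with
        | true =>
          simp only [List.foldl_cons, hp, hdc, Bool.not_true, Bool.false_eq_true, if_false,
            if_true, ih]
          simp [hp', hm, pvScan]
        | false =>
          simp only [List.foldl_cons, hp, hdc, Bool.not_true, Bool.false_eq_true, if_false,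
            if_true, ih]
          simp [hp', hm, pvScan]
      · obtain ⟨hd1, hd2⟩ := not_or.mp hd
        have hm : pvMap c = c := by simp [pvMap, hd2]
        have hdc : (['.', ','].contains c) = false := by
          simp [hd1, hd2]
        simp only [List.foldl_cons, hp, hdc, Bool.not_true, Bool.false_eq_true, if_false, ih]
        simp [hp', hm, pvScan, hd1, Ne.symm hd1]
    · have hp' : c ∉ pvAllowed := by simpa using hp
      simp only [List.foldl_cons, hp, Bool.not_false, if_true, ih]
      simp [hp']

-- ===== VERDICT (by name: the statement is the Claim_ definition above) =====
theorem clean_numeric_spec : Claim_equal_clean_numeric := by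
  intro value _
  unfold Spec_clean_numeric clean_numeric clean_numeric_alt
  rw [pv_foldB]
  simp only [List.nil_append]
  rw [pv_replace, pv_count, pv_splitOn, pv_scan_false,
    PySem.List.slice_from, pv_join_nil]
  · split_ifs <;> rfl
  · norm_num
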